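-- pv_equiv track=rewrite | github.com/alitasavori/GNN-Sandia | fpl_gnn/fpl_j_analytic_compare.py | _build_bus_phase_map
-- ===== SOURCE A (Python) =====
-- from typing import Dict, List, Tuple
--
-- def _build_bus_phase_map(
--     node_names: List[str],
-- ) -> Tuple[List[str], Dict[str, List[int]]]:
--     """
--     From node_names like '800.1', '800.2', build:
--       - ordered list of unique bus names
--       - mapping bus -> list of node indices (phases) Φ_i
--     This is used to implement the bus-level, multi-phase formulas in the draft.
--     """
--     bus_to_idx: Dict[str, List[int]] = {}
--     for idx, n in enumerate(node_names):
--         bus, _ = n.split(".")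
--         bus_to_idx.setdefault(bus, []).append(idx)
--     bus_names = sorted(bus_to_idx.keys())
--     # Sort each Φ_i by node index for reproducibility
--     for b in bus_names:
--         bus_to_idx[b] = sorted(bus_to_idx[b])
--     return bus_names, bus_to_idx
-- ===== SOURCE B (Python) =====
-- def _split_bus(n):
--     bus, _ = n.split(".")  # same ValueError as A on malformed names
--     return bus
--
-- def _build_bus_phase_map(node_names):
--     # Alternative decomposition: extract the bus list once, dedup it in first-
--     # occurrence order with dict.fromkeys, and build each phase group by a
--     # direct enumerate-filter comprehension (already in index order).
--     buses = [_split_bus(n) for n in node_names]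
--     order = list(dict.fromkeys(buses))
--     mapping = {b: [i for i, x in enumerate(buses) if x == b] for b in order}
--     return sorted(order), mapping
-- ===== Notes on version B (the rewrite author's own statement) =====
-- stated objective: alternative
-- what changed: Replaces A's incremental setdefault/append dict accumulation followed by a per-bus re-sort with a one-shot extraction of the bus list, an ordered dedup (dict.fromkeys), and one enumerate-filter comprehension per bus whose indices are already in order, so no per-bus sort is needed.
import Mathlib
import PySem

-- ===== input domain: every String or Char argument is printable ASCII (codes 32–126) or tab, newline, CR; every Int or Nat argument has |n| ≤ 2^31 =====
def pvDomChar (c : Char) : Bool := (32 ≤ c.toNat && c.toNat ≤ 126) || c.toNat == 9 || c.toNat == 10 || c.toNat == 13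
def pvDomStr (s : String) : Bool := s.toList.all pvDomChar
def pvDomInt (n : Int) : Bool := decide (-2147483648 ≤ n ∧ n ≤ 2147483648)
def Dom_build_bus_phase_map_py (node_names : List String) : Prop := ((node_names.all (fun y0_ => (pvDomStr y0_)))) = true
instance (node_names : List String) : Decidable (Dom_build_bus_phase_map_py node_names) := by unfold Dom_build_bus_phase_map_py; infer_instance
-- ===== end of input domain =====

-- B replaces A's incremental setdefault/append dict accumulation (plus a per-bus re-sort)
-- by a one-shot dedup of the extracted bus list and an enumerate-filter comprehension per bus
-- (objective: alternative decomposition; equivalence of the RETURN value is proved on Pre_).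

-- ===== PORT A =====
def build_bus_phase_map_py (node_names : List String) : List String × (List (String × List Int)) :=
  -- for idx, n in enumerate(node_names): bus, _ = n.split("."); bus_to_idx.setdefault(bus, []).append(idx)
  -- '.split(".")': sep ≠ "" so split? is some; 'bus, _ = parts' is parts' head — exact under
  -- Pre_ (exactly two parts; elsewhere Python raises ValueError and nothing is claimed)
  let bus_to_idx : PySem.Dict String (List Int) :=
    (PySem.List.enumerate node_names).foldl
      (fun d p => d.modify (((PySem.Str.split? p.2 ".").getD []).headD "") [] (fun l => l ++ [p.1]))
      PySem.Dict.empty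
  -- bus_names = sorted(bus_to_idx.keys())
  let bus_names := PySem.List.sorted bus_to_idx.keys (fun x => x)
  -- for b in bus_names: bus_to_idx[b] = sorted(bus_to_idx[b])
  let final := bus_names.foldl
    (fun d b => d.insert b (PySem.List.sorted (d.getD b []) (fun x => x))) bus_to_idx
  (bus_names, final.items)

-- ===== PORT B =====
def build_bus_phase_map_py_alt (node_names : List String) : List String × (List (String × List Int)) :=
  -- buses = [_split_bus(n) for n in node_names]; '_split_bus': 'bus, _ = n.split(".")' is the
  -- parts' head — exact under Pre_ (exactly two parts; elsewhere B raises ValueError like A)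
  let buses := node_names.map (fun n => ((PySem.Str.split? n ".").getD []).headD "")
  -- order = list(dict.fromkeys(buses))
  let order := PySem.List.dedup buses
  -- mapping = {b: [i for i, x in enumerate(buses) if x == b] for b in order}
  let mapping := order.foldl
    (fun d b => d.insert b (((PySem.List.enumerate buses).filter (fun p => p.2 == b)).map (fun p => p.1)))
    (PySem.Dict.empty : PySem.Dict String (List Int))
  (PySem.List.sorted order (fun x => x), mapping.items)

-- ===== PRECONDITION & SPEC =====
-- Pre_ excludes exactly the inputs where some name's split(".") does not have exactly two
-- parts: there A's unpacking 'bus, _ = n.split(".")' raises ValueError and returns nothing.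
def Pre_build_bus_phase_map_py (node_names : List String) : Prop :=
  ∀ n ∈ node_names, ((PySem.Str.split? n ".").getD []).length = 2
instance (node_names : List String) : Decidable (Pre_build_bus_phase_map_py node_names) := by unfold Pre_build_bus_phase_map_py; infer_instance
def pvWitness_build_bus_phase_map_py : List String := ["800.1", "800.2", "675.3", "800.3"]

def Spec_build_bus_phase_map_py (node_names : List String) (out : List String × (List (String × List Int))) : Prop := out = build_bus_phase_map_py_alt node_names
instance (node_names : List String) (out : List String × (List (String × List Int))) : Decidable (Spec_build_bus_phase_map_py node_names out) := by unfold Spec_build_bus_phase_map_py; infer_instance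

-- ===== CLAIM (what is proved, stated in full; the proofs are below) =====
def Claim_equal_build_bus_phase_map_py : Prop := ∀ (node_names : List String), Dom_build_bus_phase_map_py node_names → Pre_build_bus_phase_map_py node_names → Spec_build_bus_phase_map_py node_names (build_bus_phase_map_py node_names)
-- ===== LEMMAS AND PROOFS =====

/-- The bus extracted from a node name (shared shape of both ports' inner expression). -/
def pvBusOf (n : String) : String := ((PySem.Str.split? n ".").getD []).headD ""

theorem pv_enumerate_map {α β : Type} (f : α → β) (xs : List α) (s : Int) :
    PySem.List.enumerate (xs.map f) s
      = (PySem.List.enumerate xs s).map (fun p => (p.1, f p.2)) := by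
  induction xs generalizing s with
  | nil => simp [PySem.List.enumerate]
  | cons x t ih => simp [PySem.List.enumerate_cons, ih]

/-- A's accumulation loop. -/
def pvAccA (node_names : List String) : PySem.Dict String (List Int) :=
  (PySem.List.enumerate node_names).foldl
    (fun d p => d.modify (pvBusOf p.2) [] (fun l => l ++ [p.1])) PySem.Dict.empty

theorem pv_keysA (ns : List String) :
    (pvAccA ns).keys = PySem.List.dedup (ns.map pvBusOf) := by
  unfold pvAccA
  rw [PySem.Dict.keys_foldl_modify_key (PySem.List.enumerate ns) (fun p => pvBusOf p.2) []
        (fun _ p => (fun l => l ++ [p.1]))]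
  have h2 : (PySem.List.enumerate ns).map (fun p => pvBusOf p.2) = ns.map pvBusOf := by
    rw [show (fun p : Int × String => pvBusOf p.2) = pvBusOf ∘ (fun p : Int × String => p.2) from rfl,
        ← List.map_map, PySem.List.map_snd_enumerate]
  rw [h2]
  simp [PySem.Dict.empty, PySem.Set.update, PySem.List.dedup_eq_ofList, PySem.Set.ofList_eq_foldl]

theorem pv_getDA (ns : List String) (b : String) :
    (pvAccA ns).getD b []
      = ((PySem.List.enumerate ns).filter (fun p => pvBusOf p.2 == b)).map (fun p => p.1) := by
  unfold pvAccA
  have h : (PySem.List.enumerate ns).foldl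
      (fun d p => d.modify (pvBusOf p.2) [] (fun l => l ++ [p.1])) PySem.Dict.empty
    = ((PySem.List.enumerate ns).map (fun p => (pvBusOf p.2, p.1))).foldl
      (fun d q => d.modify q.1 [] (fun l => l ++ [q.2])) PySem.Dict.empty := by
    rw [List.foldl_map]
  rw [h, PySem.Dict.getD_foldl_modify_append]
  simp [List.filter_map, List.map_map, Function.comp_def, PySem.Dict.empty, PySem.Dict.getD,
        PySem.Dict.get?]

/-- B's per-bus group. -/
def pvGroupB (ns : List String) (b : String) : List Int :=
  ((PySem.List.enumerate (ns.map pvBusOf)).filter (fun p => p.2 == b)).map (fun p => p.1)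

theorem pv_group_eq (ns : List String) (b : String) :
    pvGroupB ns b = (pvAccA ns).getD b [] := by
  rw [pv_getDA, pvGroupB, pv_enumerate_map]
  simp [List.filter_map, List.map_map, Function.comp_def]

theorem pv_group_sorted (ns : List String) (b : String) :
    PySem.List.sorted (pvGroupB ns b) (fun x => x) = pvGroupB ns b := by
  apply PySem.List.sorted_eq_self_of_pairwise _ (fun x => x)
  unfold pvGroupB
  have h1 : ((PySem.List.enumerate (ns.map pvBusOf)).filter (fun p => p.2 == b)).Pairwise
      (fun p q => p.1 < q.1) :=
    (PySem.List.pairwise_lt_enumerate _ 0).sublist List.filter_sublist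
  exact List.Pairwise.map (S := fun a b : Int => a ≤ b) (fun p : Int × String => p.1)
    (fun a b h => le_of_lt h) h1

theorem pv_insert_getD_self {κ ν : Type} [BEq κ] [LawfulBEq κ] (d : PySem.Dict κ ν)
    (b : κ) (v0 : ν) (hnd : d.keys.Nodup) (hc : d.contains b = true) :
    d.insert b (d.getD b v0) = d := by
  apply PySem.Dict.ext
  rw [PySem.Dict.items_insert_of_contains d _ hc]
  have : ∀ p ∈ d.items, (if (p.1 == b) = true then (b, d.getD b v0) else p) = p := by
    intro p hp
    by_cases h : p.1 = b
    · subst h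
      simp [PySem.Dict.getD_of_mem_items d hp hnd]
    · simp [h]
  rw [List.map_congr_left this]
  simp

theorem pv_resort_id (L : List String) (d : PySem.Dict String (List Int))
    (hnd : d.keys.Nodup)
    (h : ∀ b ∈ L, d.contains b = true ∧
          PySem.List.sorted (d.getD b []) (fun x => x) = d.getD b []) :
    L.foldl (fun d b => d.insert b (PySem.List.sorted (d.getD b []) (fun x => x))) d = d := by
  induction L with
  | nil => rfl
  | cons b t ih =>
    have hb := h b (by simp)
    simp only [List.foldl_cons, hb.2, pv_insert_getD_self d b [] hnd hb.1]
    exact ih (fun c hc => h c (by simp [hc]))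

theorem pv_nodup_keysA (ns : List String) : (pvAccA ns).keys.Nodup := by
  rw [pv_keysA]
  exact PySem.List.nodup_dedup _

-- ===== VERDICT (by name: the statement is the Claim_ definition above) =====
theorem build_bus_phase_map_py_spec : Claim_equal_build_bus_phase_map_py := by
  intro ns _ _
  unfold Spec_build_bus_phase_map_py
  have e1 : build_bus_phase_map_py ns
      = (PySem.List.sorted (pvAccA ns).keys (fun x => x),
         ((PySem.List.sorted (pvAccA ns).keys (fun x => x)).foldl
            (fun d b => d.insert b (PySem.List.sorted (d.getD b []) (fun x => x)))
            (pvAccA ns)).items) := rfl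
  have e2 : build_bus_phase_map_py_alt ns
      = (PySem.List.sorted (PySem.List.dedup (ns.map pvBusOf)) (fun x => x),
         ((PySem.List.dedup (ns.map pvBusOf)).foldl
            (fun d b => d.insert b (pvGroupB ns b)) PySem.Dict.empty).items) := rfl
  have hresort :
      (PySem.List.sorted (pvAccA ns).keys (fun x => x)).foldl
        (fun d b => d.insert b (PySem.List.sorted (d.getD b []) (fun x => x))) (pvAccA ns)
      = pvAccA ns := by
    apply pv_resort_id _ _ (pv_nodup_keysA ns)
    intro b hb
    refine ⟨(PySem.Dict.contains_iff_mem_keys _ _).mpr ((PySem.List.mem_sorted _ _ _ _).mp hb), ?_⟩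
    rw [← pv_group_eq, pv_group_sorted]
  have hB : ((PySem.List.dedup (ns.map pvBusOf)).foldl
        (fun d b => d.insert b (pvGroupB ns b)) PySem.Dict.empty).items
      = (PySem.List.dedup (ns.map pvBusOf)).map (fun b => (b, pvGroupB ns b)) := by
    rw [PySem.Dict.items_foldl_insert_fresh _ (fun b => b) (pvGroupB ns) PySem.Dict.empty
        (fun a _ => PySem.Dict.contains_empty a)
        (by simp only [List.map_id_fun', id]; exact PySem.List.nodup_dedup (ns.map pvBusOf))]
    simp [PySem.Dict.empty]
  have hA : (pvAccA ns).items
      = (PySem.List.dedup (ns.map pvBusOf)).map (fun b => (b, pvGroupB ns b)) := by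
    rw [PySem.Dict.items_eq_map_keys (pvAccA ns) (pv_nodup_keysA ns) [], pv_keysA]
    exact List.map_congr_left (fun b _ => by rw [pv_group_eq])
  rw [e1, e2, hresort, pv_keysA, hA, hB]
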